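-- pv_equiv track=rewrite | github.com/mina4gerges/MinaGerges_1486 | Q3-plusPetitDiviseur.py | plusPetitDiviseur
-- ===== SOURCE A (Python) =====
-- from math import sqrt
--
-- def plusPetitDiviseur(n):
--     '''
--     tester tous les nombre n entre 1 et radical de N
--     pour voir si le rest de la division de N par n
--     est egale a
--
--     plus petit diviseur est le nombre > 1
--
--     si apres le test il n'y pas autre que 1 comme un diviseur --> le nombre lui
--     meme est le plus petit diviseur
--     '''
--     assert n > 0 ,'nombre doit etre positive'
--     finalRes = 0
--     nbrRange = int(sqrt(n))
--     for x in range(nbrRange):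
--         tempRes = n % (x+1)
--         if(tempRes == 0):
--             finalRes = (x+1)
--     if(finalRes == 1):
--         finalRes = n
--     return finalRes
-- ===== SOURCE B (Python) =====
-- from math import sqrt
--
-- def plusPetitDiviseur(n):
--     # Descending search: return the first (= largest) divisor <= sqrt(n) directly,
--     # instead of scanning all candidates upward and keeping the last in an accumulator.
--     assert n > 0, 'nombre doit etre positive'
--     finalRes = 0
--     for d in range(int(sqrt(n)), 0, -1):
--         if n % d == 0:
--             finalRes = d
--             break
--     if finalRes == 1:
--         finalRes = n
--     return finalRes
-- ===== Notes on version B (the rewrite author's own statement) =====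
-- stated objective: simpler
-- what changed: Replaces the ascending scan that overwrites an accumulator with every divisor found by a descending search that stops at the first (largest) divisor <= sqrt(n) and maintains nothing.
import Mathlib
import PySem

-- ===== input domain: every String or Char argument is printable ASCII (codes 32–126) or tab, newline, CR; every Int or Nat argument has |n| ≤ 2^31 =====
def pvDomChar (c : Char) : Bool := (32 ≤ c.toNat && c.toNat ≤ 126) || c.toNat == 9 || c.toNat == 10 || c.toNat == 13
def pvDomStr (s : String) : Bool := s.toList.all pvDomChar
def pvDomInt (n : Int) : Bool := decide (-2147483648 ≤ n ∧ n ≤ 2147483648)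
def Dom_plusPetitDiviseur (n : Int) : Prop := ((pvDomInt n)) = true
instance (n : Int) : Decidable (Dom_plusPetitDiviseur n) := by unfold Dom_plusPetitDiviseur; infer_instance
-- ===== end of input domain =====

-- B searches downward from int(sqrt(n)) and stops at the first divisor, instead of
-- A's upward scan keeping the last divisor in an accumulator (same result, simpler).


-- ===== PORT A =====
-- int(sqrt(n)) is ported as (Nat.sqrt n.toNat : Int): exact on the domain (|n| ≤ 2^31 < 2^52,
-- where the float sqrt is correctly rounded and int() of it equals the integer sqrt).
def plusPetitDiviseur (n : Int) : Int :=
  let nbrRange : Int := (Nat.sqrt n.toNat : Int)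
  let finalRes : Int :=
    (PySem.List.pyRange 0 nbrRange 1).foldl
      (fun acc x => if n % (x + 1) = 0 then x + 1 else acc) 0
  if finalRes = 1 then n else finalRes

-- ===== PORT B =====
-- B's descending 'for d in range(r, 0, -1): … break' loop, as structural recursion on d.
def pvDescFind (n : Int) : Nat → Int
  | 0 => 0
  | d + 1 => if n % ((d : Int) + 1) = 0 then (d : Int) + 1 else pvDescFind n d

def plusPetitDiviseur_alt (n : Int) : Int :=
  let finalRes := pvDescFind n (Nat.sqrt n.toNat)
  if finalRes = 1 then n else finalRes

-- ===== PRECONDITION & SPEC =====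
-- Pre_ excludes exactly n ≤ 0, where A's 'assert n > 0' raises AssertionError.
def Pre_plusPetitDiviseur (n : Int) : Prop := 0 < n
instance (n : Int) : Decidable (Pre_plusPetitDiviseur n) := by unfold Pre_plusPetitDiviseur; infer_instance
def pvWitness_plusPetitDiviseur : Int := 12

def Spec_plusPetitDiviseur (n : Int) (out : Int) : Prop := out = plusPetitDiviseur_alt n
instance (n : Int) (out : Int) : Decidable (Spec_plusPetitDiviseur n out) := by unfold Spec_plusPetitDiviseur; infer_instance

-- ===== CLAIM (what is proved, stated in full; the proofs are below) =====
def Claim_equal_plusPetitDiviseur : Prop := ∀ (n : Int), Dom_plusPetitDiviseur n → Pre_plusPetitDiviseur n → Spec_plusPetitDiviseur n (plusPetitDiviseur n)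

-- ===== LEMMAS AND PROOFS =====

-- A's ascending last-divisor fold over range(k) equals B's descending first-divisor search from k.
theorem pvFold_eq_desc (n : Int) (k : Nat) :
    (PySem.List.pyRange 0 (k : Int) 1).foldl
      (fun acc x => if n % (x + 1) = 0 then x + 1 else acc) 0 = pvDescFind n k := by
  induction k with
  | zero => simp [pvDescFind]
  | succ k ih =>
    push_cast
    rw [PySem.List.pyRange_one_succ_right (by positivity)]
    simp only [List.foldl_append, List.foldl_cons, List.foldl_nil, pvDescFind]
    rw [ih]

-- ===== VERDICT (by name: the statement is the Claim_ definition above) =====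
theorem plusPetitDiviseur_spec : Claim_equal_plusPetitDiviseur := by
  intro n _ _
  unfold Spec_plusPetitDiviseur plusPetitDiviseur plusPetitDiviseur_alt
  simp only [pvFold_eq_desc]
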